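-- pv_equiv track=rewrite | github.com/KSU-SDML/Jawdah | Jawdah.py | follow_underscore
-- ===== SOURCE A (Python) =====
-- def follow_underscore(text):
--
--     # Rule-1
--     if ((text.startswith("_")) or (text.endswith('_')) or ("_" not in text)): return False
--     # Rule-2:
--     if "-" in text: return False # for text like "read_book-ok"
--
--     # Rule-3 & Rule-4
--     continuous_underscrore_count = 0
--     for letter in text[1:]:
--         if letter.isupper(): return False #Rule-3
--
--         if letter.isdigit(): continue #letter.islower() or
--         if letter == "_":continuous_underscrore_count+=1
--         else: continuous_underscrore_count = 0
--         if continuous_underscrore_count>=2: return False # Rule-4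
--     return True
-- ===== SOURCE B (Python) =====
-- def follow_underscore(text):
--     if text.startswith("_") or text.endswith("_") or "_" not in text:
--         return False
--     if "-" in text:
--         return False
--     body = text[1:]
--     if any(c.isupper() for c in body):
--         return False
--     stripped = ''.join(c for c in body if not c.isdigit())
--     return "__" not in stripped
-- ===== Notes on version B (the rewrite author's own statement) =====
-- stated objective: simpler
-- what changed: Replaced the fused single-pass counter loop with separate declarative passes: an any() uppercase check over text[1:], then a double-underscore substring membership test on a digit-stripped copy.
import Mathlib
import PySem

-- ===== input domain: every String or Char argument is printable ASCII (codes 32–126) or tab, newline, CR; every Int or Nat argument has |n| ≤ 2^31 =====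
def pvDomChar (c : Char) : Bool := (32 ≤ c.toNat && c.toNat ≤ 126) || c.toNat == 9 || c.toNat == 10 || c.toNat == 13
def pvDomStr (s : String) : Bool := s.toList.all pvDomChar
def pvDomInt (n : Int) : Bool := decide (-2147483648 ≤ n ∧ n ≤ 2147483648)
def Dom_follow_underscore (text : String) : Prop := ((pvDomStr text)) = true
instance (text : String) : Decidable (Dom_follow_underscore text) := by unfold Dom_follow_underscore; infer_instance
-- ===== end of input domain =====

-- B replaces A's fused counter loop by separate passes (uppercase check, then a '__' test on a
-- digit-stripped copy of text[1:]); objective: simpler, same O(n) cost.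

-- ===== PORT A =====
-- A's for-loop over text[1:] with the running consecutive-underscore counter.
def followLoopA : List Char → Nat → Bool
  | [], _ => true
  | c :: rest, cnt =>
    if PySem.Chars.isupper c then false
    else if PySem.Chars.isdigit c then followLoopA rest cnt
    else
      let cnt' := if c = '_' then cnt + 1 else 0
      if 2 ≤ cnt' then false else followLoopA rest cnt'

def follow_underscore (text : String) : Bool :=
  if PySem.Str.startswith text "_" || PySem.Str.endswith text "_" || !PySem.Str.isIn "_" text then
    false
  else if PySem.Str.isIn "-" text then false
  else followLoopA (PySem.List.slice text.toList (some 1) none) 0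

-- ===== PORT B =====
def follow_underscore_alt (text : String) : Bool :=
  if PySem.Str.startswith text "_" || PySem.Str.endswith text "_" || !PySem.Str.isIn "_" text then
    false
  else if PySem.Str.isIn "-" text then false
  else
    let body := PySem.List.slice text.toList (some 1) none
    if body.any (fun c => PySem.Chars.isupper c) then false
    else !PySem.Chars.isIn ['_', '_'] (body.filter (fun c => !PySem.Chars.isdigit c))

-- ===== PRECONDITION & SPEC =====
def Spec_follow_underscore (text : String) (out : Bool) : Prop := out = follow_underscore_alt text
instance (text : String) (out : Bool) : Decidable (Spec_follow_underscore text out) := by unfold Spec_follow_underscore; infer_instance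

-- ===== CLAIM (what is proved, stated in full; the proofs are below) =====
def Claim_equal_follow_underscore : Prop := ∀ (text : String), Dom_follow_underscore text → Spec_follow_underscore text (follow_underscore text)

-- ===== LEMMAS AND PROOFS =====

-- '__' occurs as a substring of l  (structural form used to analyse A's counter loop)
def hasDD : List Char → Bool
  | '_' :: '_' :: _ => true
  | _ :: rest => hasDD rest
  | [] => false

lemma hasDD_cons (c : Char) (l : List Char) :
    hasDD (c :: l) = ((decide (c = '_') && decide (l.head? = some '_')) || hasDD l) := by
  cases l with
  | nil =>
    by_cases hc : c = '_' <;> simp [hasDD, hc]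
  | cons b t =>
    by_cases hc : c = '_' <;> by_cases hb : b = '_' <;> subst_vars <;> simp_all [hasDD]

lemma hasDD_iff_infix (l : List Char) : hasDD l = true ↔ ['_', '_'] <:+: l := by
  induction l with
  | nil => simp [hasDD]
  | cons c t ih =>
    rw [List.infix_cons_iff, hasDD_cons]
    constructor
    · intro h
      rcases Bool.or_eq_true_iff.mp h with h | h
      · left
        obtain ⟨hc, ht⟩ := Bool.and_eq_true_iff.mp h
        cases t with
        | nil => simp at ht
        | cons b t' =>
          simp at hc ht
          subst hc; subst ht
          exact List.cons_prefix_cons.mpr ⟨rfl, List.cons_prefix_cons.mpr ⟨rfl, List.nil_prefix⟩⟩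
      · exact Or.inr (ih.mp h)
    · rintro (h | h)
      · cases t with
        | nil => rcases h with ⟨s, hs⟩; simp at hs
        | cons b t' =>
          obtain ⟨hc, h2⟩ := List.cons_prefix_cons.mp h
          obtain ⟨hb, _⟩ := List.cons_prefix_cons.mp h2
          subst hc; subst hb; simp
      · simp [ih.mpr h]

-- the heart: A's counter loop equals B's two passes, with the counter recorded as a
-- replicate-prefix of underscores already seen
lemma followLoopA_eq (xs : List Char) : ∀ (cnt : Nat), cnt ≤ 1 →
    followLoopA xs cnt =
      (!xs.any (fun c => PySem.Chars.isupper c) &&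
       !hasDD (List.replicate cnt '_' ++ xs.filter (fun c => !PySem.Chars.isdigit c))) := by
  induction xs with
  | nil =>
    intro cnt hcnt
    interval_cases cnt <;> simp [followLoopA, hasDD]
  | cons c rest ih =>
    intro cnt hcnt
    by_cases hu : PySem.Chars.isupper c
    · simp [followLoopA, hu]
    · by_cases hd : PySem.Chars.isdigit c
      · simpa [followLoopA, hu, hd] using ih cnt hcnt
      · by_cases hus : c = '_'
        · subst hus
          interval_cases cnt
          · simpa [followLoopA, hu, hd, List.replicate_succ] using ih 1 (by norm_num)
          · simp [followLoopA, hu, hd, hasDD]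
        · have hkey : hasDD (List.replicate cnt '_' ++ c :: rest.filter (fun c => !PySem.Chars.isdigit c))
              = hasDD (c :: rest.filter (fun c => !PySem.Chars.isdigit c)) := by
            interval_cases cnt
            · rfl
            · simp [hasDD_cons, hus]
          have hkey2 : hasDD (c :: rest.filter (fun c => !PySem.Chars.isdigit c))
              = hasDD (rest.filter (fun c => !PySem.Chars.isdigit c)) := by
            rw [hasDD_cons]; simp [hus]
          simp only [followLoopA, hu, hd, if_neg hus]
          norm_num
          rw [ih 0 (by norm_num)]
          simp [hu, hd, hkey, hkey2]

-- ===== VERDICT (by name: the statement is the Claim_ definition above) =====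
theorem follow_underscore_spec : Claim_equal_follow_underscore := by
  intro text _
  unfold Spec_follow_underscore follow_underscore follow_underscore_alt
  split
  · rfl
  · split
    · rfl
    · rw [followLoopA_eq _ 0 (by norm_num)]
      simp only [List.replicate_zero, List.nil_append]
      have := hasDD_iff_infix ((PySem.List.slice text.toList (some 1) none).filter
        (fun c => !PySem.Chars.isdigit c))
      rw [show PySem.Chars.isIn ['_', '_'] ((PySem.List.slice text.toList (some 1) none).filter
        (fun c => !PySem.Chars.isdigit c)) = hasDD ((PySem.List.slice text.toList (some 1) none).filter
        (fun c => !PySem.Chars.isdigit c)) from ?_]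
      · by_cases h : (PySem.List.slice text.toList (some 1) none).any (fun c => PySem.Chars.isupper c) <;>
          simp [h]
      · rcases Bool.eq_false_or_eq_true (hasDD _) with h | h
        · rw [h, (PySem.Chars.isIn_iff_infix _ _).mpr ((hasDD_iff_infix _).mp h)]
        · rw [h, (PySem.Chars.isIn_eq_false_iff _ _).mpr (fun hc => by rw [(hasDD_iff_infix _).mpr hc] at h; exact absurd h (by simp))]
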